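-- pv_equiv track=rewrite | github.com/MichalRozenwald/epiCausality | epiCode/CpG_counts/cpg_count.py | count_surrounding_cpgs
-- ===== SOURCE A (Python) =====
-- def find_cpgs(dna: str) -> list[int]:
--     """Return the start positions of all CpG dinucleotides in a DNA string."""
--     dna = dna.upper()
--     return [i for i in range(len(dna) - 1) if dna[i] == "C" and dna[i + 1] == "G"]
--
-- def count_surrounding_cpgs(dna: str, n: int) -> dict[int, int]:
--     """
--     For each CpG in dna, count how many *other* CpGs have their start position
--     within N bases (i.e. |pos_other - pos_self| <= N, excluding self).
--
--     Returns a dict mapping each CpG start position -> surrounding CpG count.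
--     """
--     cpg_positions = find_cpgs(dna)
--     result = {}
--     for pos in cpg_positions:
--         count = sum(
--             1
--             for other in cpg_positions
--             if other != pos and abs(other - pos) <= n
--         )
--         result[pos] = count
--     return result
-- ===== SOURCE B (Python) =====
-- def _advance(ps, i, pred):
--     while i < len(ps) and pred(ps[i]):
--         i += 1
--     return i
--
-- def count_surrounding_cpgs(dna, n):
--     u = dna.upper()
--     ps = [i for i in range(len(u) - 1) if u[i] == "C" and u[i + 1] == "G"]
--     if n < 0:
--         return {p: 0 for p in ps}
--     result = {}
--     lo = hi = 0
--     for p in ps: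
--         lo = _advance(ps, lo, lambda o: o < p - n)
--         hi = _advance(ps, hi, lambda o: o <= p + n)
--         result[p] = hi - lo - 1
--     return result
-- ===== Notes on version B (the rewrite author's own statement) =====
-- stated objective: alternative
-- what changed: A rescans the whole CpG-position list for every CpG (quadratic in the number of CpG sites); B walks the sorted position list once with two sliding-window pointers, each count being hi - lo - 1, and returns an all-zeros dict directly when n < 0.
import Mathlib
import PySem

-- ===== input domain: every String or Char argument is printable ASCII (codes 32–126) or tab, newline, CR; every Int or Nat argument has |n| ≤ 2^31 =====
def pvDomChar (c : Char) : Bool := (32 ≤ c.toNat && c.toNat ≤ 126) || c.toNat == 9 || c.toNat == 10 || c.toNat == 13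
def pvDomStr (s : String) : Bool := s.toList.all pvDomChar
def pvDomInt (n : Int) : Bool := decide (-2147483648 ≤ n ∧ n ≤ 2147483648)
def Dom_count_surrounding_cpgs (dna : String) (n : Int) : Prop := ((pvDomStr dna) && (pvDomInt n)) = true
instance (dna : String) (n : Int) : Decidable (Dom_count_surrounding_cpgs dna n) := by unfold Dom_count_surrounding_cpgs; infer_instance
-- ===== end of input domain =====

set_option maxHeartbeats 1000000


-- B replaces A's per-CpG rescan of the whole CpG-position list by a two-pointer sliding window over the (sorted) positions (alternative algorithm; window count = hi - lo - 1).

-- ===== PORT A =====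
def find_cpgs (dna : String) : List Int :=
  let u := PySem.Str.upper dna
  (PySem.List.pyRange 0 (PySem.Str.len u - 1) 1).filter
    (fun i => PySem.Str.pyGet? u i == some 'C' && PySem.Str.pyGet? u (i + 1) == some 'G')

def count_surrounding_cpgs (dna : String) (n : Int) : List (Int × Int) :=
  let cpg_positions := find_cpgs dna
  let result := cpg_positions.foldl
    (fun (d : PySem.Dict Int Int) pos =>
      let count : Int := cpg_positions.foldl
        (fun c other => if other ≠ pos ∧ |other - pos| ≤ n then c + 1 else c) 0
      d.insert pos count)
    PySem.Dict.empty
  result.items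

-- ===== PORT B =====
def bFindCpgs (dna : String) : List Int :=
  let u := PySem.Str.upper dna
  (PySem.List.pyRange 0 (PySem.Str.len u - 1) 1).filter
    (fun i => PySem.Str.pyGet? u i == some 'C' && PySem.Str.pyGet? u (i + 1) == some 'G')

-- Python helper _advance(ps, i, pred): while i < len(ps) and pred(ps[i]): i += 1
def bAdvance (ps : List Int) (i : Nat) (pred : Int → Bool) : Nat :=
  if h : i < ps.length then
    if pred ps[i] then bAdvance ps (i + 1) pred else i
  else i
termination_by ps.length - i

def count_surrounding_cpgs_alt (dna : String) (n : Int) : List (Int × Int) :=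
  let ps := bFindCpgs dna
  if n < 0 then
    (ps.foldl (fun (d : PySem.Dict Int Int) p => d.insert p 0) PySem.Dict.empty).items
  else
    (ps.foldl
      (fun (st : Nat × Nat × PySem.Dict Int Int) p =>
        let lo := bAdvance ps st.1 (fun o => decide (o < p - n))
        let hi := bAdvance ps st.2.1 (fun o => decide (o ≤ p + n))
        (lo, hi, st.2.2.insert p ((hi : Int) - (lo : Int) - 1)))
      (0, 0, PySem.Dict.empty)).2.2.items

-- ===== PRECONDITION & SPEC =====
def Spec_count_surrounding_cpgs (dna : String) (n : Int) (out : List (Int × Int)) : Prop := out = count_surrounding_cpgs_alt dna n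
instance (dna : String) (n : Int) (out : List (Int × Int)) : Decidable (Spec_count_surrounding_cpgs dna n out) := by unfold Spec_count_surrounding_cpgs; infer_instance

-- ===== CLAIM (what is proved, stated in full; the proofs are below) =====
def Claim_equal_count_surrounding_cpgs : Prop := ∀ (dna : String) (n : Int), Dom_count_surrounding_cpgs dna n → Spec_count_surrounding_cpgs dna n (count_surrounding_cpgs dna n)

-- ===== LEMMAS AND PROOFS =====

-- bAdvance from index i skips exactly the longest pred-prefix of (ps.drop i)
theorem bAdvance_eq (ps : List Int) (q : Int → Bool) (i : Nat) :
    bAdvance ps i q = i + ((ps.drop i).takeWhile q).length := by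
  have H : ∀ fuel i, ps.length - i ≤ fuel →
      bAdvance ps i q = i + ((ps.drop i).takeWhile q).length := by
    intro fuel
    induction fuel with
    | zero =>
      intro i h
      have hge : ps.length ≤ i := by omega
      rw [bAdvance]
      simp [Nat.not_lt.mpr hge, List.drop_eq_nil_of_le hge]
    | succ f ih =>
      intro i h
      rw [bAdvance]
      by_cases hlt : i < ps.length
      · rw [dif_pos hlt, List.drop_eq_getElem_cons hlt]
        by_cases hq : q ps[i]
        · rw [if_pos hq, ih (i + 1) (by omega), List.takeWhile_cons_of_pos hq]
          simp
          omega
        · rw [if_neg hq, List.takeWhile_cons_of_neg (by simp [hq])]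
          simp
      · have hge : ps.length ≤ i := by omega
        rw [dif_neg hlt]
        simp [List.drop_eq_nil_of_le hge]
  exact H ps.length i (by omega)

-- on a sorted list, a downward-closed predicate's takeWhile-prefix is its whole filter
theorem takeWhile_length_eq_countP (ps : List Int) (q : Int → Bool)
    (hs : ps.Pairwise (· < ·))
    (hmono : ∀ a b : Int, a ≤ b → q b = true → q a = true) :
    (ps.takeWhile q).length = ps.countP q := by
  induction ps with
  | nil => rfl
  | cons a as ih =>
    rcases List.pairwise_cons.mp hs with ⟨ha, hs'⟩
    by_cases hq : q a
    · rw [List.takeWhile_cons_of_pos hq]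
      simp [ih hs', hq]
    · have hz : as.countP q = 0 := by
        rw [List.countP_eq_zero]
        intro x hx hqx
        exact hq (hmono a x (le_of_lt (ha x hx)) hqx)
      rw [List.takeWhile_cons_of_neg (by simp [hq])]
      simp [hz, hq]

-- resuming the pointer at countP q and advancing with a weaker predicate q' lands on countP q'
theorem bAdvance_resume (ps : List Int) (q q' : Int → Bool)
    (hs : ps.Pairwise (· < ·))
    (hmono : ∀ a b : Int, a ≤ b → q b = true → q a = true)
    (hmono' : ∀ a b : Int, a ≤ b → q' b = true → q' a = true)
    (himp : ∀ x, q x = true → q' x = true) :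
    bAdvance ps (ps.countP q) q' = ps.countP q' := by
  rw [bAdvance_eq]
  have h2 : (ps.takeWhile q).length = ps.countP q := takeWhile_length_eq_countP ps q hs hmono
  have hdrop : ps.drop (ps.countP q) = ps.dropWhile q := by
    rw [← h2]
    have : (ps.takeWhile q ++ ps.dropWhile q).drop (ps.takeWhile q).length = ps.dropWhile q :=
      List.drop_left ..
    rwa [List.takeWhile_append_dropWhile] at this
  rw [hdrop]
  have hsplit : ps.countP q' = (ps.takeWhile q).countP q' + (ps.dropWhile q).countP q' := by
    conv_lhs => rw [← List.takeWhile_append_dropWhile (p := q) (l := ps)]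
    exact List.countP_append ..
  have hfull : (ps.takeWhile q).countP q' = (ps.takeWhile q).length := by
    rw [List.countP_eq_length]
    intro x hx
    exact himp x (List.mem_takeWhile_imp hx)
  have htw : ((ps.dropWhile q).takeWhile q').length = (ps.dropWhile q).countP q' :=
    takeWhile_length_eq_countP _ q' (List.Pairwise.sublist (List.dropWhile_sublist q) hs) hmono'
  omega

-- pointwise window split away from p
theorem window_count_aux (p n : Int) (l : List Int) (hn : 0 ≤ n) (hp : ∀ o ∈ l, o ≠ p) :
    l.countP (fun o => decide (o ≠ p ∧ |o - p| ≤ n)) + l.countP (fun o => decide (o < p - n))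
      = l.countP (fun o => decide (o ≤ p + n)) := by
  induction l with
  | nil => rfl
  | cons a as ih =>
    have ha : a ≠ p := hp a (List.mem_cons_self ..)
    have ih' := ih (fun o ho => hp o (List.mem_cons_of_mem _ ho))
    simp only [List.countP_cons, decide_eq_true_eq, abs_le] at *
    split_ifs <;> omega

-- counting the other CpGs in the window = (#≤ p+n) − (#< p−n) − 1, for p occurring once
theorem window_count (ps : List Int) (p n : Int) (hn : 0 ≤ n) (hmem : p ∈ ps) (hnd : ps.Nodup) :
    ps.countP (fun o => decide (o ≠ p ∧ |o - p| ≤ n)) + ps.countP (fun o => decide (o < p - n)) + 1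
      = ps.countP (fun o => decide (o ≤ p + n)) := by
  induction ps with
  | nil => cases hmem
  | cons a as ih =>
    rcases List.nodup_cons.mp hnd with ⟨hnotmem, hnd'⟩
    rcases List.mem_cons.mp hmem with h | h
    · subst h
      have haux := window_count_aux p n as hn (fun o ho h => hnotmem (h ▸ ho))
      simp only [List.countP_cons, decide_eq_true_eq, abs_le] at *
      split_ifs <;> omega
    · by_cases ha : a = p
      · exact absurd h (ha ▸ hnotmem)
      · have ih' := ih h hnd'
        simp only [List.countP_cons, decide_eq_true_eq, abs_le] at *
        split_ifs <;> omega

-- the two-pointer loop, started at pointers = counts of previous (downward-closed) thresholds,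
-- builds the same dict as A's rescanning loop
theorem loopB_eq (ps : List Int) (n : Int) (hn : 0 ≤ n) (hs : ps.Pairwise (· < ·)) :
    ∀ (l : List Int), l.Sublist ps →
    ∀ (q₁ q₂ : Int → Bool),
    (∀ a b : Int, a ≤ b → q₁ b = true → q₁ a = true) →
    (∀ a b : Int, a ≤ b → q₂ b = true → q₂ a = true) →
    (∀ p ∈ l, ∀ x, q₁ x = true → x < p - n) →
    (∀ p ∈ l, ∀ x, q₂ x = true → x ≤ p + n) →
    ∀ (d : PySem.Dict Int Int),
    (l.foldl
      (fun (st : Nat × Nat × PySem.Dict Int Int) p =>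
        let lo := bAdvance ps st.1 (fun o => decide (o < p - n))
        let hi := bAdvance ps st.2.1 (fun o => decide (o ≤ p + n))
        (lo, hi, st.2.2.insert p ((hi : Int) - (lo : Int) - 1)))
      (ps.countP q₁, ps.countP q₂, d)).2.2
    = l.foldl
      (fun (d : PySem.Dict Int Int) pos =>
        d.insert pos
          (ps.foldl (fun c other => if other ≠ pos ∧ |other - pos| ≤ n then c + 1 else c) (0 : Int)))
      d := by
  intro l
  induction l with
  | nil => intros; rfl
  | cons p l' ih =>
    intro hsub q₁ q₂ hm₁ hm₂ h₁ h₂ d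
    have hp : p ∈ ps := hsub.subset (List.mem_cons_self ..)
    have hnd : ps.Nodup := hs.imp ne_of_lt
    have hlo : bAdvance ps (ps.countP q₁) (fun o => decide (o < p - n))
        = ps.countP (fun o => decide (o < p - n)) :=
      bAdvance_resume ps q₁ _ hs hm₁
        (fun a b hab hb => by simp only [decide_eq_true_eq] at *; omega)
        (fun x hx => decide_eq_true (h₁ p (List.mem_cons_self ..) x hx))
    have hhi : bAdvance ps (ps.countP q₂) (fun o => decide (o ≤ p + n))
        = ps.countP (fun o => decide (o ≤ p + n)) :=
      bAdvance_resume ps q₂ _ hs hm₂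
        (fun a b hab hb => by simp only [decide_eq_true_eq] at *; omega)
        (fun x hx => decide_eq_true (h₂ p (List.mem_cons_self ..) x hx))
    have hval : ((ps.countP (fun o => decide (o ≤ p + n)) : Int)
          - (ps.countP (fun o => decide (o < p - n)) : Int) - 1)
        = ps.foldl (fun c other => if other ≠ p ∧ |other - p| ≤ n then c + 1 else c) (0 : Int) := by
      rw [PySem.List.foldl_ite_add_one]
      have := window_count ps p n hn hp hnd
      push_cast [← this]
      ring
    have hsorted : (p :: l').Pairwise (· < ·) := List.Pairwise.sublist hsub hs
    have hlt : ∀ p' ∈ l', p < p' := (List.pairwise_cons.mp hsorted).1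
    simp only [List.foldl_cons, hlo, hhi, hval]
    exact ih ((List.sublist_cons_self p l').trans hsub) _ _
      (fun a b hab hb => by simp only [decide_eq_true_eq] at *; omega)
      (fun a b hab hb => by simp only [decide_eq_true_eq] at *; omega)
      (fun p' hp' x hx => by have := hlt p' hp'; simp only [decide_eq_true_eq] at hx; omega)
      (fun p' hp' x hx => by have := hlt p' hp'; simp only [decide_eq_true_eq] at hx; omega)
      _

theorem find_cpgs_sorted (dna : String) : (find_cpgs dna).Pairwise (· < ·) := by
  unfold find_cpgs
  exact (PySem.List.pairwise_lt_pyRange_one ..).filter _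

-- ===== VERDICT (by name: the statement is the Claim_ definition above) =====
theorem count_surrounding_cpgs_spec : Claim_equal_count_surrounding_cpgs := by
  intro dna n _
  unfold Spec_count_surrounding_cpgs count_surrounding_cpgs count_surrounding_cpgs_alt
  have hfind : bFindCpgs dna = find_cpgs dna := rfl
  rw [hfind]
  set ps := find_cpgs dna with hps
  have hs : ps.Pairwise (· < ·) := find_cpgs_sorted dna
  by_cases hn : n < 0
  · rw [if_pos hn]
    refine congrArg PySem.Dict.items ?_
    refine PySem.List.foldl_congr_mem _ _ _ _ ?_
    intro d pos _
    show d.insert pos (ps.foldl (fun c other => if other ≠ pos ∧ |other - pos| ≤ n then c + 1 else c) (0 : Int)) = d.insert pos 0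
    have hz : ps.foldl (fun c other => if other ≠ pos ∧ |other - pos| ≤ n then c + 1 else c) (0 : Int) = 0 := by
      rw [PySem.List.foldl_ite_add_one]
      have h0 : ps.countP (fun o => decide (o ≠ pos ∧ |o - pos| ≤ n)) = 0 := by
        rw [List.countP_eq_zero]
        intro x _ hx
        simp only [decide_eq_true_eq] at hx
        have := abs_nonneg (x - pos)
        omega
      rw [h0]
      simp
    rw [hz]
  · rw [if_neg hn]
    have h := loopB_eq ps n (by omega) hs ps (List.Sublist.refl ps)
      (fun _ => false) (fun _ => false)
      (fun a b _ hb => absurd hb (Bool.false_ne_true))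
      (fun a b _ hb => absurd hb (Bool.false_ne_true))
      (fun p _ x hx => absurd hx (Bool.false_ne_true))
      (fun p _ x hx => absurd hx (Bool.false_ne_true))
      PySem.Dict.empty
    simp only [List.countP_false, Function.const_apply] at h
    have h2 := congrArg PySem.Dict.items h
    rw [← h2]
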